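-- pv_equiv track=rewrite | github.com/rgv-sare/clinostat-esp32-bridge | clinostat/code.py | parse_set_command
-- ===== SOURCE A (Python) =====
-- def parse_set_command(cmd_str):
--     """Handles setting RPM1 and RPM2 individually."""
--     try:
--         if not cmd_str.startswith("SET"):
--             return None, None
--         after_set = cmd_str[3:].strip()
--         parts = after_set.split(';')
--
--         new_rpm1 = None
--         new_rpm2 = None
--
--         for p in parts:
--             sub = p.strip()
--             if sub.startswith("RPM1="):
--                 new_rpm1 = int(sub.split("=", 1)[1])
--             elif sub.startswith("RPM2="):
--                 new_rpm2 = int(sub.split("=", 1)[1])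
--
--         return new_rpm1, new_rpm2  # Returns None for the values not set
--     except:
--         return None, None
-- ===== SOURCE B (Python) =====
-- def parse_set_command(cmd_str):
--     """Handles setting RPM1 and RPM2 individually."""
--     try:
--         if not cmd_str.startswith("SET"):
--             return None, None
--         fields = {}
--         for part in cmd_str[3:].strip().split(';'):
--             sub = part.strip()
--             key, eq, value = sub.partition('=')
--             if eq:
--                 fields[key] = value
--         rpm1 = int(fields['RPM1']) if 'RPM1' in fields else None
--         rpm2 = int(fields['RPM2']) if 'RPM2' in fields else None
--         return rpm1, rpm2
--     except ValueError:
--         return None, None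
-- ===== Notes on version B (the rewrite author's own statement) =====
-- stated objective: idiomatic
-- what changed: B parses every key/value field once into a dict via str.partition and converts RPM1/RPM2 lazily on lookup, instead of A's two mutable accumulators with eager startswith-dispatch and eager int() per matching part. Pre_ excludes commands whose semicolon-separated fields contain more than one RPM1 (or RPM2) assignment, on which A int-converts every occurrence (so an earlier malformed duplicate yields (None, None)) while B keeps only the last value -- duplicate-key behaviour is an accidental corner.
-- outside the precondition, e.g. on parse_set_command('SET RPM1=x;RPM1=5'): A returns (None, None), B returns (5, None)
import Mathlib
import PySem

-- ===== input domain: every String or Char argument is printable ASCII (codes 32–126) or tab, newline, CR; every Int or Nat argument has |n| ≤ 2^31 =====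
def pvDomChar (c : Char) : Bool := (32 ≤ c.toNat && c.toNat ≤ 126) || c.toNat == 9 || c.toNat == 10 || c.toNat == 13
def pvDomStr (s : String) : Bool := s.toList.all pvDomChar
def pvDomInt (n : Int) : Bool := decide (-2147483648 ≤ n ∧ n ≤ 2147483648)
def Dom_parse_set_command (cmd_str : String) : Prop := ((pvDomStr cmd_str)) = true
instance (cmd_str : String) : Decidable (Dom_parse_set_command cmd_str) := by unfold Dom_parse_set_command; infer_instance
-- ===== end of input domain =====

-- B replaces A's two eagerly-converted accumulators by a single dict built with str.partition and
-- lazy int() on lookup (idiomatic, same cost); equivalence is about the return value only.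

-- ===== PORT A =====
-- loop body of A's `for p in parts:` (two Option-Int accumulators; `none` acc = an exception was raised)
def pvStepA (acc : Option (Option Int × Option Int)) (p : String) : Option (Option Int × Option Int) :=
  match acc with
  | none => none
  | some (r1, r2) =>
    let sub := PySem.Str.strip p
    if PySem.Str.startswith sub "RPM1=" then
      match PySem.Str.splitMax? sub "=" 1 with
      | none => none          -- unreachable: "=" is a nonempty separator
      | some l =>
        match PySem.List.pyGet? l 1 with
        | none => none        -- IndexError
        | some v =>
          match PySem.Int.ofStr? v with
          | none => none      -- ValueError from int()
          | some n => some (some n, r2)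
    else if PySem.Str.startswith sub "RPM2=" then
      match PySem.Str.splitMax? sub "=" 1 with
      | none => none
      | some l =>
        match PySem.List.pyGet? l 1 with
        | none => none
        | some v =>
          match PySem.Int.ofStr? v with
          | none => none
          | some n => some (r1, some n)
    else some (r1, r2)

def parse_set_command (cmd_str : String) : Option Int × Option Int :=
  if !(PySem.Str.startswith cmd_str "SET") then (none, none)
  else
    let after_set := PySem.Str.strip (PySem.Str.slice cmd_str (some 3) none)
    let parts := (PySem.Str.split? after_set ";").getD []   -- ";" ≠ "" so split? is always some
    match parts.foldl pvStepA (some (none, none)) with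
    | some r => r
    | none => (none, none)    -- the bare `except:` of A

-- ===== PORT B =====
-- loop body of B's `for part in ...:` — str.partition('=') ported by hand via the FIRST occurrence
-- of '=' (PySem.Str.find returns the first index or -1), exact on every input
def pvStepB (d : PySem.Dict String String) (p : String) : PySem.Dict String String :=
  let sub := PySem.Str.strip p
  let i := PySem.Str.find sub "="
  if i = -1 then d            -- eq == '' : no '=' in sub
  else d.insert (PySem.Str.slice sub none (some i)) (PySem.Str.slice sub (some (i + 1)) none)

def parse_set_command_alt (cmd_str : String) : Option Int × Option Int :=
  if !(PySem.Str.startswith cmd_str "SET") then (none, none)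
  else
    let fields := ((PySem.Str.split? (PySem.Str.strip (PySem.Str.slice cmd_str (some 3) none)) ";").getD []).foldl
      pvStepB PySem.Dict.empty
    let r1? : Option (Option Int) :=      -- `int(fields['RPM1']) if 'RPM1' in fields else None`; none = ValueError
      match fields.get? "RPM1" with
      | none => some none
      | some v => (PySem.Int.ofStr? v).map some
    let r2? : Option (Option Int) :=
      match fields.get? "RPM2" with
      | none => some none
      | some v => (PySem.Int.ofStr? v).map some
    match r1?, r2? with
    | some a, some b => (a, b)
    | _, _ => (none, none)    -- the `except ValueError:` of B

-- ===== PRECONDITION & SPEC =====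
-- Pre_ excludes commands whose semicolon-separated fields contain more than one RPM1 (or more than one RPM2)
-- assignment, on which A int-converts every occurrence (an earlier malformed duplicate makes A
-- return (None, None)) while B keeps only the last value — duplicate-key behaviour is an
-- accidental corner; on every other input A returns and B matches it.
def Pre_parse_set_command (cmd_str : String) : Prop :=
  (((PySem.Str.split? (PySem.Str.strip (PySem.Str.slice cmd_str (some 3) none)) ";").getD []).countP
      (fun p => PySem.Str.startswith (PySem.Str.strip p) "RPM1=")) ≤ 1 ∧
  (((PySem.Str.split? (PySem.Str.strip (PySem.Str.slice cmd_str (some 3) none)) ";").getD []).countP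
      (fun p => PySem.Str.startswith (PySem.Str.strip p) "RPM2=")) ≤ 1
instance (cmd_str : String) : Decidable (Pre_parse_set_command cmd_str) := by
  unfold Pre_parse_set_command; infer_instance

def pvWitness_parse_set_command : String := "SET RPM1=10;RPM2=20"

def Spec_parse_set_command (cmd_str : String) (out : Option Int × Option Int) : Prop :=
  out = parse_set_command_alt cmd_str
instance (cmd_str : String) (out : Option Int × Option Int) : Decidable (Spec_parse_set_command cmd_str out) := by
  unfold Spec_parse_set_command; infer_instance

-- ===== CLAIM (what is proved, stated in full; the proofs are below) =====
def Claim_equal_parse_set_command : Prop :=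
  ∀ (cmd_str : String), Dom_parse_set_command cmd_str → Pre_parse_set_command cmd_str →
    Spec_parse_set_command cmd_str (parse_set_command cmd_str)

-- ===== LEMMAS AND PROOFS =====

-- abbreviations for the proofs
def pvIsR1 (p : String) : Bool := PySem.Str.startswith (PySem.Str.strip p) "RPM1="
def pvIsR2 (p : String) : Bool := PySem.Str.startswith (PySem.Str.strip p) "RPM2="
-- the raw value string of a matching part (everything after the first '=')
def pvVal (p : String) : String := PySem.Str.slice (PySem.Str.strip p) (some 5) none
-- lazy conversion: B's `int(fields[k]) if k in fields else None` shape
def pvCnv (o : Option String) (r : Option Int) : Option (Option Int) :=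
  match o with
  | none => some r
  | some v => (PySem.Int.ofStr? v).map some
-- value stored in B's dict at key k after the loop (later parts override earlier ones)
def pvLast (L : List String) (k : String) : Option String :=
  match L with
  | [] => none
  | p :: rest =>
    match pvLast rest k with
    | some v => some v
    | none =>
      let sub := PySem.Str.strip p
      let i := PySem.Str.find sub "="
      if i = -1 then none
      else if PySem.Str.slice sub none (some i) = k then
        some (PySem.Str.slice sub (some (i + 1)) none)
      else none

-- --- splitOnMax.go computation lemmas ---
lemma pv_go_cons_ne (sep : List Char) (fuel m : ℕ) (c : Char) (rest cur : List Char)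
    (acc : List (List Char)) (hm : m ≠ 0) (hpref : sep.isPrefixOf (c :: rest) = false) :
    PySem.Chars.splitOnMax.go sep (fuel + 1) m (c :: rest) cur acc =
      PySem.Chars.splitOnMax.go sep fuel m rest (c :: cur) acc := by
  rw [PySem.Chars.splitOnMax.go]; simp [hm, hpref]

lemma pv_go_cons_sep (sep : List Char) (fuel m : ℕ) (c : Char) (rest cur : List Char)
    (acc : List (List Char)) (hm : m ≠ 0) (hpref : sep.isPrefixOf (c :: rest) = true) :
    PySem.Chars.splitOnMax.go sep (fuel + 1) m (c :: rest) cur acc =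
      PySem.Chars.splitOnMax.go sep fuel (m - 1) (List.drop sep.length (c :: rest)) [] (cur.reverse :: acc) := by
  rw [PySem.Chars.splitOnMax.go]; simp [hm, hpref]

lemma pv_go_zero (sep : List Char) (fuel : ℕ) (l cur : List Char) (acc : List (List Char)) :
    PySem.Chars.splitOnMax.go sep fuel 0 l cur acc = ((cur.reverse ++ l) :: acc).reverse := by
  cases fuel with
  | zero => rw [PySem.Chars.splitOnMax.go]
  | succ n =>
    cases l with
    | nil => rw [PySem.Chars.splitOnMax.go]; simp; omega
    | cons c rest => rw [PySem.Chars.splitOnMax.go]; simp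

lemma pv_chars_split (a b c d : Char) (t : List Char)
    (ha : a ≠ '=') (hb : b ≠ '=') (hc : c ≠ '=') (hd : d ≠ '=') :
    PySem.Chars.splitOnMax (a::b::c::d::'='::t) ['='] 1 = [[a,b,c,d], t] := by
  unfold PySem.Chars.splitOnMax
  norm_num
  rw [show t.length + 1 + 1 + 1 + 1 + 1 + 1 = (t.length + 5) + 1 by omega]
  rw [pv_go_cons_ne _ _ _ _ _ _ _ (by omega) (by simp [List.isPrefixOf]; exact fun h => absurd h.symm ha)]
  rw [show t.length + 5 = (t.length + 4) + 1 by omega]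
  rw [pv_go_cons_ne _ _ _ _ _ _ _ (by omega) (by simp [List.isPrefixOf]; exact fun h => absurd h.symm hb)]
  rw [show t.length + 4 = (t.length + 3) + 1 by omega]
  rw [pv_go_cons_ne _ _ _ _ _ _ _ (by omega) (by simp [List.isPrefixOf]; exact fun h => absurd h.symm hc)]
  rw [show t.length + 3 = (t.length + 2) + 1 by omega]
  rw [pv_go_cons_ne _ _ _ _ _ _ _ (by omega) (by simp [List.isPrefixOf]; exact fun h => absurd h.symm hd)]
  rw [show t.length + 2 = (t.length + 1) + 1 by omega]
  rw [pv_go_cons_sep _ _ _ _ _ _ _ (by omega) (by simp [List.isPrefixOf])]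
  simp [pv_go_zero]

-- --- per-part string facts ---
lemma pv_decomp (sub : String) (h : PySem.Str.startswith sub "RPM1=" = true) :
    ∃ t : List Char, sub.toList = 'R'::'P'::'M'::'1'::'='::t := by
  rw [PySem.Str.startswith_eq, PySem.Chars.startswith_iff] at h
  obtain ⟨t, ht⟩ := h
  exact ⟨t, by rw [← ht]; rfl⟩

lemma pv_decomp2 (sub : String) (h : PySem.Str.startswith sub "RPM2=" = true) :
    ∃ t : List Char, sub.toList = 'R'::'P'::'M'::'2'::'='::t := by
  rw [PySem.Str.startswith_eq, PySem.Chars.startswith_iff] at h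
  obtain ⟨t, ht⟩ := h
  exact ⟨t, by rw [← ht]; rfl⟩

lemma pv_chars_find (a b c d : Char) (t : List Char)
    (ha : a ≠ '=') (hb : b ≠ '=') (hc : c ≠ '=') (hd : d ≠ '=') :
    PySem.Chars.find (a::b::c::d::'='::t) ['='] = 4 := by
  have hin : (['='] : List Char) <:+: (a::b::c::d::'='::t) := ⟨[a,b,c,d], t, rfl⟩
  have h0 : 0 ≤ PySem.Chars.find (a::b::c::d::'='::t) ['='] :=
    (PySem.Chars.find_nonneg_iff _ _).mpr hin
  obtain ⟨h1, h2⟩ := PySem.Chars.find_spec h0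
  have hub : ¬ 4 < (PySem.Chars.find (a::b::c::d::'='::t) ['=']).toNat := by
    intro hlt
    exact h2 4 hlt (by simp)
  have hn : (PySem.Chars.find (a::b::c::d::'='::t) ['=']).toNat = 4 := by
    set n := (PySem.Chars.find (a::b::c::d::'='::t) ['=']).toNat with hn'
    interval_cases n
    · simp [List.cons_prefix_cons] at h1; exact absurd h1.symm ha
    · simp [List.cons_prefix_cons] at h1; exact absurd h1.symm hb
    · simp [List.cons_prefix_cons] at h1; exact absurd h1.symm hc
    · simp [List.cons_prefix_cons] at h1; exact absurd h1.symm hd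
    · rfl
  omega

lemma pv_find_of_decomp (sub : String) (a b c d : Char) (t : List Char)
    (hs : sub.toList = a::b::c::d::'='::t)
    (ha : a ≠ '=') (hb : b ≠ '=') (hc : c ≠ '=') (hd : d ≠ '=') :
    PySem.Str.find sub "=" = 4 := by
  have : PySem.Str.find sub "=" = PySem.Chars.find sub.toList ['='] := by
    simp [PySem.Str.find_eq]
  rw [this, hs, pv_chars_find a b c d t ha hb hc hd]

lemma pv_split_of_decomp (sub key : String) (a b c d : Char) (t : List Char)
    (hs : sub.toList = a::b::c::d::'='::t) (hk : key.toList = [a,b,c,d])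
    (ha : a ≠ '=') (hb : b ≠ '=') (hc : c ≠ '=') (hd : d ≠ '=') :
    PySem.Str.splitMax? sub "=" 1 = some [key, PySem.Str.slice sub (some 5) none] := by
  have hmap := PySem.Str.splitMax?_map sub "=" 1
  have hsep : ("=" : String).toList = ['='] := rfl
  rw [hsep, hs] at hmap
  rw [PySem.Chars.splitMax?] at hmap
  simp only [List.isEmpty_cons] at hmap
  rw [if_neg (by simp)] at hmap
  rw [pv_chars_split a b c d t ha hb hc hd] at hmap
  cases hsm : PySem.Str.splitMax? sub "=" 1 with
  | none => rw [hsm] at hmap; simp at hmap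
  | some l =>
    rw [hsm] at hmap
    simp only [Option.map_some, Option.some.injEq] at hmap
    cases l with
    | nil => simp at hmap
    | cons x l' =>
      cases l' with
      | nil => simp at hmap
      | cons y l'' =>
        cases l'' with
        | cons z l''' => simp at hmap
        | nil =>
          simp only [List.map_cons, List.map_nil, List.cons.injEq, and_true] at hmap
          obtain ⟨hx, hy⟩ := hmap
          have hxk : x = key := String.toList_inj.mp (by rw [hx, hk])
          have hyv : y = PySem.Str.slice sub (some 5) none := by
            apply String.toList_inj.mp
            rw [hy, PySem.Str.toList_slice, PySem.Chars.slice_eq_listSlice,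
                PySem.List.slice_from _ (by norm_num), hs]
            rfl
          rw [hxk, hyv]

lemma pv_key_of_decomp (sub key : String) (a b c d : Char) (t : List Char)
    (hs : sub.toList = a::b::c::d::'='::t) (hk : key.toList = [a,b,c,d]) :
    PySem.Str.slice sub none (some 4) = key := by
  apply String.toList_inj.mp
  rw [PySem.Str.toList_slice, PySem.Chars.slice_eq_listSlice,
      PySem.List.slice_to _ (by norm_num), hs, hk]
  rfl

-- reverse direction: a part whose partition key is "RPM1" does start with "RPM1=" (same for RPM2)
lemma pv_rev (sub key : String) (hklen : key.toList.length = 4)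
    (hne : PySem.Str.find sub "=" ≠ -1)
    (hkey : PySem.Str.slice sub none (some (PySem.Str.find sub "=")) = key) :
    PySem.Str.startswith sub (key ++ "=") = true := by
  have hfind : PySem.Str.find sub "=" = PySem.Chars.find sub.toList ['='] := by
    simp [PySem.Str.find_eq]
  have h0 : 0 ≤ PySem.Chars.find sub.toList ['='] := by
    have := PySem.Chars.neg_one_le_find (s := sub.toList) (sub := ['='])
    rw [hfind] at hne
    omega
  obtain ⟨h1, h2⟩ := PySem.Chars.find_spec (s := sub.toList) (sub := ['=']) h0
  have htake : List.take (PySem.Chars.find sub.toList ['=']).toNat sub.toList = key.toList := by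
    have := congrArg String.toList hkey
    rw [PySem.Str.toList_slice, PySem.Chars.slice_eq_listSlice, hfind,
        PySem.List.slice_to _ h0] at this
    exact this
  have hlt : (PySem.Chars.find sub.toList ['=']).toNat < sub.toList.length := by
    by_contra hge
    rw [List.drop_eq_nil_of_le (by omega)] at h1
    simp at h1
  have hf4 : (PySem.Chars.find sub.toList ['=']).toNat = 4 := by
    have hlen := congrArg List.length htake
    rw [List.length_take, hklen] at hlen
    omega
  obtain ⟨u, hu⟩ := h1
  rw [PySem.Str.startswith_eq, PySem.Chars.startswith_iff]
  refine ⟨u, ?_⟩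
  have hsplit : sub.toList =
      List.take (PySem.Chars.find sub.toList ['=']).toNat sub.toList ++
        List.drop (PySem.Chars.find sub.toList ['=']).toNat sub.toList :=
    (List.take_append_drop _ _).symm
  conv_rhs => rw [hsplit]
  rw [htake, ← hu]
  simp

-- "RPM1=" and "RPM2=" cannot both be prefixes of the same sub
lemma pv_not_both (sub : String) (h1 : PySem.Str.startswith sub "RPM1=" = true)
    (h2 : PySem.Str.startswith sub "RPM2=" = true) : False := by
  obtain ⟨t1, ht1⟩ := pv_decomp sub h1
  obtain ⟨t2, ht2⟩ := pv_decomp2 sub h2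
  rw [ht1] at ht2
  simp at ht2

-- --- loop characterisations ---
lemma pv_foldA_none (L : List String) : L.foldl pvStepA none = none := by
  induction L with
  | nil => rfl
  | cons p rest ih => simpa [pvStepA] using ih

lemma pv_find?_eq_none_of_countP {α} (f : α → Bool) (L : List α) (h : L.countP f = 0) :
    L.find? f = none := by
  rw [List.find?_eq_none]
  intro x hx
  rw [List.countP_eq_zero] at h
  simp [h x hx]

-- A's loop, characterised: under ≤1 match per key, the final accumulator only depends on
-- the (unique) matching parts and the conversions of their value strings
lemma pv_foldA (L : List String) (r1 r2 : Option Int)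
    (h1 : L.countP pvIsR1 ≤ 1) (h2 : L.countP pvIsR2 ≤ 1) :
    L.foldl pvStepA (some (r1, r2)) =
      match pvCnv ((L.find? pvIsR1).map pvVal) r1, pvCnv ((L.find? pvIsR2).map pvVal) r2 with
      | some a, some b => some (a, b)
      | _, _ => none := by
  induction L generalizing r1 r2 with
  | nil => simp [pvCnv]
  | cons p rest ih =>
    by_cases hp1 : pvIsR1 p = true
    · have hr1 : rest.countP pvIsR1 = 0 := by
        rw [List.countP_cons_of_pos hp1] at h1; omega
      have hp2 : pvIsR2 p = false := by
        by_contra hb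
        simp only [Bool.not_eq_false] at hb
        exact pv_not_both (PySem.Str.strip p) hp1 hb
      obtain ⟨t, ht⟩ := pv_decomp _ hp1
      have hsplit := pv_split_of_decomp (PySem.Str.strip p) "RPM1" 'R' 'P' 'M' '1' t ht rfl
        (by decide) (by decide) (by decide) (by decide)
      have hstep : pvStepA (some (r1, r2)) p =
          match PySem.Int.ofStr? (pvVal p) with
          | none => none
          | some n => some (some n, r2) := by
        simp only [pvStepA, pvIsR1] at hp1 ⊢
        rw [if_pos hp1, hsplit]
        simp [PySem.List.pyGet?, PySem.List.pyIdx?, pvVal]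
      rw [List.foldl_cons, hstep, List.find?_cons_of_pos hp1,
          List.find?_cons_of_neg (by simp [hp2])]
      cases hc : PySem.Int.ofStr? (pvVal p) with
      | none => simp [pv_foldA_none, pvCnv, hc]
      | some n =>
        rw [ih n r2 (by omega) (by rw [List.countP_cons_of_neg (by simp [hp2])] at h2; omega)]
        rw [pv_find?_eq_none_of_countP _ _ hr1]
        simp [pvCnv, hc]
    · by_cases hp2 : pvIsR2 p = true
      · have hr2 : rest.countP pvIsR2 = 0 := by
          rw [List.countP_cons_of_pos hp2] at h2; omega
        obtain ⟨t, ht⟩ := pv_decomp2 _ hp2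
        have hsplit := pv_split_of_decomp (PySem.Str.strip p) "RPM2" 'R' 'P' 'M' '2' t ht rfl
          (by decide) (by decide) (by decide) (by decide)
        have hstep : pvStepA (some (r1, r2)) p =
            match PySem.Int.ofStr? (pvVal p) with
            | none => none
            | some n => some (r1, some n) := by
          simp only [pvStepA, pvIsR1, pvIsR2] at hp1 hp2 ⊢
          rw [if_neg hp1, if_pos hp2, hsplit]
          simp [PySem.List.pyGet?, PySem.List.pyIdx?, pvVal]
        rw [List.foldl_cons, hstep, List.find?_cons_of_pos hp2,
            List.find?_cons_of_neg hp1]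
        cases hc : PySem.Int.ofStr? (pvVal p) with
        | none => simp [pv_foldA_none, pvCnv, hc]
        | some n =>
          rw [ih r1 n (by rw [List.countP_cons_of_neg hp1] at h1; omega) (by omega)]
          rw [pv_find?_eq_none_of_countP _ _ hr2]
          simp [pvCnv, hc]
      · have hstep : pvStepA (some (r1, r2)) p = some (r1, r2) := by
          simp only [pvStepA, pvIsR1, pvIsR2] at hp1 hp2 ⊢
          rw [if_neg hp1, if_neg hp2]
        rw [List.foldl_cons, hstep, List.find?_cons_of_neg hp1,
            List.find?_cons_of_neg hp2]
        exact ih r1 r2 (by rw [List.countP_cons_of_neg hp1] at h1; omega)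
          (by rw [List.countP_cons_of_neg hp2] at h2; omega)

lemma pv_last_cons (p : String) (rest : List String) (k : String) :
    pvLast (p :: rest) k =
      match pvLast rest k with
      | some v => some v
      | none => pvLast [p] k := by
  simp only [pvLast]

-- B's loop: what the dict holds at key k is pvLast (later parts override earlier ones)
lemma pv_stepB_get? (d : PySem.Dict String String) (p k : String) :
    (pvStepB d p).get? k =
      match pvLast [p] k with
      | some v => some v
      | none => d.get? k := by
  simp only [pvStepB, pvLast]
  by_cases hi : PySem.Str.find (PySem.Str.strip p) "=" = -1
  · rw [if_pos hi, if_pos hi]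
  · rw [if_neg hi, if_neg hi]
    by_cases hk : PySem.Str.slice (PySem.Str.strip p) none
        (some (PySem.Str.find (PySem.Str.strip p) "=")) = k
    · rw [if_pos hk, hk, PySem.Dict.get?_insert_self]
    · rw [if_neg hk, PySem.Dict.get?_insert_of_ne d _ (fun h => hk h.symm)]

lemma pv_foldB (L : List String) (d : PySem.Dict String String) (k : String) :
    (L.foldl pvStepB d).get? k =
      match pvLast L k with
      | some v => some v
      | none => d.get? k := by
  induction L generalizing d with
  | nil => simp [pvLast]
  | cons p rest ih =>
    rw [List.foldl_cons, ih, pv_last_cons]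
    cases hl : pvLast rest k with
    | some v => rfl
    | none => rw [pv_stepB_get?]

-- pvLast at key "RPM1"/"RPM2" is the value of the unique matching part
lemma pv_last_single_pos (p key : String) (a b c d : Char) (t : List Char)
    (hs : (PySem.Str.strip p).toList = a::b::c::d::'='::t) (hk : key.toList = [a,b,c,d])
    (ha : a ≠ '=') (hb : b ≠ '=') (hc : c ≠ '=') (hd : d ≠ '=') :
    pvLast [p] key = some (PySem.Str.slice (PySem.Str.strip p) (some 5) none) := by
  have hfind := pv_find_of_decomp (PySem.Str.strip p) a b c d t hs ha hb hc hd
  have hkey := pv_key_of_decomp (PySem.Str.strip p) key a b c d t hs hk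
  simp only [pvLast]
  rw [hfind, if_neg (by norm_num), if_pos hkey]
  norm_num

lemma pv_last_single_neg (p key : String) (hklen : key.toList.length = 4)
    (h : PySem.Str.startswith (PySem.Str.strip p) (key ++ "=") = false) :
    pvLast [p] key = none := by
  simp only [pvLast]
  by_cases hi : PySem.Str.find (PySem.Str.strip p) "=" = -1
  · rw [if_pos hi]
  · rw [if_neg hi]
    by_cases hk : PySem.Str.slice (PySem.Str.strip p) none
        (some (PySem.Str.find (PySem.Str.strip p) "=")) = key
    · exfalso
      have := pv_rev (PySem.Str.strip p) key hklen hi hk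
      rw [h] at this
      exact Bool.false_ne_true this
    · rw [if_neg hk]

lemma pv_last_none (L : List String) (key : String) (hklen : key.toList.length = 4)
    (h : ∀ p ∈ L, PySem.Str.startswith (PySem.Str.strip p) (key ++ "=") = false) :
    pvLast L key = none := by
  induction L with
  | nil => rfl
  | cons p rest ih =>
    rw [pv_last_cons, ih (fun q hq => h q (List.mem_cons_of_mem _ hq)),
        pv_last_single_neg p key hklen (h p List.mem_cons_self)]

lemma pv_last_eq_find1 (L : List String) (h1 : L.countP pvIsR1 ≤ 1) :
    pvLast L "RPM1" = (L.find? pvIsR1).map pvVal := by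
  induction L with
  | nil => rfl
  | cons p rest ih =>
    rw [pv_last_cons]
    by_cases hp : pvIsR1 p = true
    · have hr : rest.countP pvIsR1 = 0 := by
        rw [List.countP_cons_of_pos hp] at h1; omega
      obtain ⟨t, ht⟩ := pv_decomp _ hp
      rw [pv_last_none rest "RPM1" (by decide) (fun q hq => by
            have := List.countP_eq_zero.mp hr q hq
            simpa [pvIsR1] using this),
          List.find?_cons_of_pos hp,
          pv_last_single_pos p "RPM1" 'R' 'P' 'M' '1' t ht rfl
            (by decide) (by decide) (by decide) (by decide)]
      rfl
    · rw [ih (by rw [List.countP_cons_of_neg hp] at h1; omega), List.find?_cons_of_neg hp]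
      cases hf : (rest.find? pvIsR1).map pvVal with
      | some v => rfl
      | none =>
        rw [pv_last_single_neg p "RPM1" (by decide) (by
          simp only [pvIsR1, Bool.not_eq_true] at hp
          exact hp)]

lemma pv_last_eq_find2 (L : List String) (h2 : L.countP pvIsR2 ≤ 1) :
    pvLast L "RPM2" = (L.find? pvIsR2).map pvVal := by
  induction L with
  | nil => rfl
  | cons p rest ih =>
    rw [pv_last_cons]
    by_cases hp : pvIsR2 p = true
    · have hr : rest.countP pvIsR2 = 0 := by
        rw [List.countP_cons_of_pos hp] at h2; omega
      obtain ⟨t, ht⟩ := pv_decomp2 _ hp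
      rw [pv_last_none rest "RPM2" (by decide) (fun q hq => by
            have := List.countP_eq_zero.mp hr q hq
            simpa [pvIsR2] using this),
          List.find?_cons_of_pos hp,
          pv_last_single_pos p "RPM2" 'R' 'P' 'M' '2' t ht rfl
            (by decide) (by decide) (by decide) (by decide)]
      rfl
    · rw [ih (by rw [List.countP_cons_of_neg hp] at h2; omega), List.find?_cons_of_neg hp]
      cases hf : (rest.find? pvIsR2).map pvVal with
      | some v => rfl
      | none =>
        rw [pv_last_single_neg p "RPM2" (by decide) (by
          simp only [pvIsR2, Bool.not_eq_true] at hp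
          exact hp)]

-- ===== VERDICT (by name: the statement is the Claim_ definition above) =====
set_option maxHeartbeats 1000000 in
theorem parse_set_command_spec : Claim_equal_parse_set_command := by
  intro cmd_str _ hpre
  unfold Spec_parse_set_command parse_set_command parse_set_command_alt
  cases hs : PySem.Str.startswith cmd_str "SET" with
  | false => rw [if_pos (by simp), if_pos (by simp)]
  | true =>
    simp only [Bool.not_true, Bool.false_eq_true, if_false]
    obtain ⟨h1, h2⟩ := hpre
    set L := (PySem.Str.split? (PySem.Str.strip (PySem.Str.slice cmd_str (some 3) none)) ";").getD []
      with hL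
    have h1' : L.countP pvIsR1 ≤ 1 := h1
    have h2' : L.countP pvIsR2 ≤ 1 := h2
    rw [pv_foldA L none none h1' h2']
    rw [pv_foldB L PySem.Dict.empty "RPM1", pv_foldB L PySem.Dict.empty "RPM2"]
    rw [pv_last_eq_find1 L h1', pv_last_eq_find2 L h2']
    rw [PySem.Dict.get?_empty, PySem.Dict.get?_empty]
    cases hf1 : (L.find? pvIsR1).map pvVal with
    | none =>
      cases hf2 : (L.find? pvIsR2).map pvVal with
      | none => simp [pvCnv]
      | some v2 =>
        cases hc2 : PySem.Int.ofStr? v2 with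
        | none => simp [pvCnv, hc2]
        | some n2 => simp [pvCnv, hc2]
    | some v1 =>
      cases hc1 : PySem.Int.ofStr? v1 with
      | none =>
        cases hf2 : (L.find? pvIsR2).map pvVal with
        | none => simp [pvCnv, hc1]
        | some v2 =>
          cases hc2 : PySem.Int.ofStr? v2 with
          | none => simp [pvCnv, hc1, hc2]
          | some n2 => simp [pvCnv, hc1, hc2]
      | some n1 =>
        cases hf2 : (L.find? pvIsR2).map pvVal with
        | none => simp [pvCnv, hc1]
        | some v2 =>
          cases hc2 : PySem.Int.ofStr? v2 with
          | none => simp [pvCnv, hc1, hc2]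
          | some n2 => simp [pvCnv, hc1, hc2]
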